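-- pv_equiv track=rewrite | github.com/Alexwcjung/2026-highschool | pages/9 🐪 ↳ 단어 말하기 게임 3.py | make_path_positions
-- ===== SOURCE A (Python) =====
-- def make_path_positions(n):
--     path = []
--
--     for c in range(n):
--         path.append((0, c))
--
--     for r in range(1, n):
--         path.append((r, n - 1))
--
--     for c in range(n - 2, -1, -1):
--         path.append((n - 1, c))
--
--     for r in range(n - 2, 0, -1):
--         path.append((r, 0))
--
--     return path
-- ===== SOURCE B (Python) =====
-- def make_path_positions(n):
--     # Closed form: cell at perimeter index k (clockwise, length 4*(n-1)).
--     if n == 1: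
--         return [(0, 0)]
--     m = n - 1
--
--     def pos(k):
--         if k < m:
--             return (0, k)
--         if k < 2 * m:
--             return (k - m, m)
--         if k < 3 * m:
--             return (m, 3 * m - k)
--         return (4 * m - k, 0)
--
--     return [pos(k) for k in range(max(4 * m, 0))]
-- ===== Notes on version B (the rewrite author's own statement) =====
-- stated objective: alternative
-- what changed: Replaces A's four stateful edge loops by a closed-form arithmetic map: the cell at perimeter index k is computed directly by a piecewise formula over one range(4*(n-1)).
import Mathlib
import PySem

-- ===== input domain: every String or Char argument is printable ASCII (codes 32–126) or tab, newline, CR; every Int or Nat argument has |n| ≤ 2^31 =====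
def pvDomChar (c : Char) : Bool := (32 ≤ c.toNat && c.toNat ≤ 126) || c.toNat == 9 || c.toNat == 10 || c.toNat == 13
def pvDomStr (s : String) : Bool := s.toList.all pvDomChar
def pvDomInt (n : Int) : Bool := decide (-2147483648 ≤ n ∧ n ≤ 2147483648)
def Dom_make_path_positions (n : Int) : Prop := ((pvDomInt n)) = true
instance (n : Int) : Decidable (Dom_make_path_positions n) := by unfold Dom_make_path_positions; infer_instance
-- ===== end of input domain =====

-- B replaces A's four stateful edge loops by a closed-form piecewise formula giving the
-- cell at perimeter index k, mapped over a single range; same output, same cost.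

-- ===== PORT A =====
def make_path_positions (n : Int) : List (Int × Int) :=
  let path : List (Int × Int) := []
  let path := (PySem.List.pyRange 0 n 1).foldl (fun acc c => acc ++ [((0 : Int), c)]) path
  let path := (PySem.List.pyRange 1 n 1).foldl (fun acc r => acc ++ [(r, n - 1)]) path
  let path := (PySem.List.pyRange (n - 2) (-1) (-1)).foldl (fun acc c => acc ++ [(n - 1, c)]) path
  let path := (PySem.List.pyRange (n - 2) 0 (-1)).foldl (fun acc r => acc ++ [(r, (0 : Int))]) path
  path

-- ===== PORT B =====
-- Source B's inner helper 'pos': the perimeter cell at index k, for side length m = n - 1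
def mppPos (m k : Int) : Int × Int :=
  if k < m then (0, k)
  else if k < 2 * m then (k - m, m)
  else if k < 3 * m then (m, 3 * m - k)
  else (4 * m - k, 0)

def make_path_positions_alt (n : Int) : List (Int × Int) :=
  if n = 1 then [(0, 0)]
  else
    let m := n - 1
    (PySem.List.pyRange 0 (max (4 * m) 0) 1).map (fun k => mppPos m k)

-- ===== PRECONDITION & SPEC =====
def Spec_make_path_positions (n : Int) (out : List (Int × Int)) : Prop := out = make_path_positions_alt n
instance (n : Int) (out : List (Int × Int)) : Decidable (Spec_make_path_positions n out) := by unfold Spec_make_path_positions; infer_instance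

-- ===== CLAIM =====
def Claim_equal_make_path_positions : Prop := ∀ (n : Int), Dom_make_path_positions n → Spec_make_path_positions n (make_path_positions n)

-- ===== LEMMAS AND PROOFS =====

theorem foldl_append_map {α β : Type} (l : List α) (f : α → β) (init : List β) :
    l.foldl (fun acc x => acc ++ [f x]) init = init ++ l.map f := by
  induction l generalizing init with
  | nil => simp
  | cons x xs ih => simp [List.foldl, ih]

theorem make_path_positions_spec : Claim_equal_make_path_positions := by
  intro n _
  unfold Spec_make_path_positions
  dsimp only [make_path_positions, make_path_positions_alt]
  by_cases h1 : n = 1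
  · subst h1; decide
  by_cases h : n ≤ 0
  · rw [if_neg h1]
    rw [PySem.List.pyRange_one_eq_nil (by omega),
        PySem.List.pyRange_one_eq_nil (by omega),
        PySem.List.pyRange_neg_one_eq_nil (by omega),
        PySem.List.pyRange_neg_one_eq_nil (by omega),
        PySem.List.pyRange_one_eq_nil (by omega)]
    simp
  · -- n ≥ 2
    have hn : 2 ≤ n := by omega
    rw [if_neg h1]
    set m : Int := n - 1 with hm
    have hmax : max (4 * m) 0 = 4 * m := by omega
    rw [hmax]
    rw [foldl_append_map, foldl_append_map, foldl_append_map, foldl_append_map]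
    simp only [List.nil_append, List.append_assoc]
    -- split B's single range at the four chunk boundaries m+1, 2m+1, 3m+1
    rw [PySem.List.pyRange_one_append 0 (m + 1) (4 * m) (by omega) (by omega),
        PySem.List.pyRange_one_append (m + 1) (2 * m + 1) (4 * m) (by omega) (by omega),
        PySem.List.pyRange_one_append (2 * m + 1) (3 * m + 1) (4 * m) (by omega) (by omega)]
    simp only [List.map_append]
    congr 1
    · -- top edge: range(n) ↦ (0, c)   vs   k ∈ [0, m] ↦ mppPos m k
      rw [PySem.List.pyRange_one 0 n, PySem.List.pyRange_one 0 (m + 1)]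
      rw [show (n - 0).toNat = (m + 1 - 0).toNat from by omega]
      simp only [List.map_map]
      refine List.map_congr_left (fun j hj => ?_)
      simp only [List.mem_range] at hj
      have hjm : (j : Int) ≤ m := by omega
      simp only [Function.comp, mppPos, zero_add]
      by_cases hc : (j : Int) < m
      · rw [if_pos hc]
      · have : (j : Int) = m := by omega
        rw [if_neg hc, if_pos (by omega)]
        simp [this]
    congr 1
    · -- right edge: range(1, n) ↦ (r, n-1)   vs   k ∈ [m+1, 2m] ↦ mppPos m k
      rw [PySem.List.pyRange_one 1 n, PySem.List.pyRange_one (m + 1) (2 * m + 1)]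
      rw [show (n - 1).toNat = (2 * m + 1 - (m + 1)).toNat from by omega]
      simp only [List.map_map]
      refine List.map_congr_left (fun j hj => ?_)
      simp only [List.mem_range] at hj
      have hjm : (j : Int) < m := by omega
      simp only [Function.comp, mppPos]
      rw [if_neg (by omega)]
      by_cases hc : m + 1 + (j : Int) < 2 * m
      · rw [if_pos hc]; simp [Prod.ext_iff]; omega
      · rw [if_neg hc, if_pos (by omega)]
        simp [Prod.ext_iff]; omega
    congr 1
    · -- bottom edge: range(n-2, -1, -1) ↦ (n-1, c)   vs   k ∈ [2m+1, 3m] ↦ mppPos m k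
      rw [PySem.List.pyRange_neg_one (n - 2) (-1), PySem.List.pyRange_one (2 * m + 1) (3 * m + 1)]
      rw [show (n - 2 - (-1)).toNat = (3 * m + 1 - (2 * m + 1)).toNat from by omega]
      simp only [List.map_map]
      refine List.map_congr_left (fun j hj => ?_)
      simp only [List.mem_range] at hj
      have hjm : (j : Int) < m := by omega
      simp only [Function.comp, mppPos]
      rw [if_neg (by omega), if_neg (by omega)]
      by_cases hc : 2 * m + 1 + (j : Int) < 3 * m
      · rw [if_pos hc]; simp [Prod.ext_iff]; omega
      · rw [if_neg hc]; simp [Prod.ext_iff]; omega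
    · -- left edge: range(n-2, 0, -1) ↦ (r, 0)   vs   k ∈ [3m+1, 4m-1] ↦ mppPos m k
      rw [PySem.List.pyRange_neg_one (n - 2) 0, PySem.List.pyRange_one (3 * m + 1) (4 * m)]
      rw [show (n - 2 - 0).toNat = (4 * m - (3 * m + 1)).toNat from by omega]
      simp only [List.map_map]
      refine List.map_congr_left (fun j hj => ?_)
      simp only [List.mem_range] at hj
      have hjm : (j : Int) < m - 1 := by omega
      simp only [Function.comp, mppPos]
      rw [if_neg (by omega), if_neg (by omega), if_neg (by omega)]
      simp [Prod.ext_iff]; omega
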